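-- pv_equiv track=rewrite | github.com/anu-0035/Practice | gfg/Min Chars to Add for Palindrome/code.py | minChar
-- ===== SOURCE A (Python) =====
-- def minChar(s):
--     #Write your code here
--     def LPS(s):
--         lps = [0] * len(s)
--         length = 0
--         i = 1
--         while i < len(s):
--             if s[i] == s[length]:
--                 length += 1
--                 lps[i] = length
--                 i += 1
--             else:
--                 if length != 0:
--                     length = lps[length - 1]
--                 else:
--                     lps[i] = 0
--                     i += 1
--         return lps[-1]
--
--     rev_s = s[::-1]
--     combined = s+ "#" + rev_s
--     lps = LPS(combined)
--     return len(s) - lps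
-- ===== SOURCE B (Python) =====
-- def minChar(s):
--     # answer = len(s) - length of the longest palindromic prefix of s
--     n = len(s)
--     for L in range(n, -1, -1):
--         p = s[:L]
--         if p == p[::-1]:
--             return n - L
-- ===== Notes on version B (the rewrite author's own statement) =====
-- stated objective: simpler
-- what changed: Replaces A's KMP failure-function over s+'#'+reversed(s) with a direct downward scan for the longest palindromic prefix (first L from len(s) down with s[:L] equal to its reverse), returning len(s)-L.
-- intended difference: On strings where s+'#'+reversed(s) has a border longer than len(s) -- possible only when s contains A's separator '#', e.g. s='#' -- A returns len(s) minus that spurious border (even negative: A('#') = -1), while B returns len(s) minus the longest palindromic prefix, the intended minimal number of characters to add. — e.g. on minChar("#"): A returns -1, B returns 0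
import Mathlib
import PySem

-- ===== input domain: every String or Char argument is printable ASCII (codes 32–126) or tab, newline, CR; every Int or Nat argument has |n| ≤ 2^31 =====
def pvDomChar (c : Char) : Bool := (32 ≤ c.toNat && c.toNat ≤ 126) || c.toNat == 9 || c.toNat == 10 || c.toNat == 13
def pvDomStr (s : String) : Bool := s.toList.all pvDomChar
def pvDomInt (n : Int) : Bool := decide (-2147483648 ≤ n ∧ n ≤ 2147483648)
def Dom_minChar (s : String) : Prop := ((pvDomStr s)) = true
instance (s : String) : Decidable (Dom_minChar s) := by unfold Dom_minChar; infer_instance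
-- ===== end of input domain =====

-- B computes len(s) minus the longest palindromic prefix by a direct downward scan instead of A's
-- KMP failure function over s + "#" + reversed(s); objective: simpler, same return value on '#'-free inputs.

-- ===== PORT A =====
-- the while loop of LPS, state (lps, length, i); the fuel argument only makes the loop total:
-- the proof below shows 2*len(combined) steps always suffice (each step decreases 2*(n-i)+length).
def lpsLoop (t : List Char) : Nat → List Nat → Nat → Nat → List Nat
  | 0, lps, _, _ => lps
  | fuel+1, lps, length, i =>
    if i < t.length then
      if t[i]? = t[length]? then                    -- s[i] == s[length] (both indices in range here)
        lpsLoop t fuel (lps.set i (length+1)) (length+1) (i+1)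
      else if length ≠ 0 then
        lpsLoop t fuel lps (lps.getD (length-1) 0) i   -- length = lps[length-1] (in range; getD guard unreachable)
      else
        lpsLoop t fuel (lps.set i 0) 0 (i+1)
    else lps

-- rev_s = s[::-1]; combined = s + "#" + rev_s; lps = LPS(combined) (the fuelled while loop,
-- starting from lps = [0]*len(combined), length = 0, i = 1); result = len(s) - lps[-1]
def minChar (s : String) : Int :=
  (s.toList.length : Int) -
    ((PySem.List.pyGet? (lpsLoop (s.toList ++ '#' :: s.toList.reverse)
        (2 * (s.toList ++ '#' :: s.toList.reverse).length)
        (List.replicate (s.toList ++ '#' :: s.toList.reverse).length 0) 0 1) (-1)).getD 0 : Nat)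

-- ===== PORT B =====
-- for L in range(n, -1, -1): if s[:L] == s[:L][::-1]: return n - L   (L = 0 always matches)
def palPrefLoop (s : List Char) : Nat → Nat
  | 0 => 0
  | L+1 => if s.take (L+1) = (s.take (L+1)).reverse then L+1 else palPrefLoop s L

def minChar_alt (s : String) : Int :=
  (s.toList.length : Int) - (palPrefLoop s.toList s.toList.length : Nat)

-- ===== PRECONDITION & SPEC =====
-- On strings where s + '#' + reversed(s) has a border longer than len(s) — possible only when s
-- itself contains A's separator '#', e.g. s = "#" — A returns len(s) minus that spurious border
-- (even negative: A("#") = -1), while B returns len(s) minus the longest palindromic prefix of s,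
-- the intended minimal number of characters to add at the front.
def D_minChar (s : String) : Prop :=
  '#' ∈ s.toList ∧ ∃ b < 2 * s.toList.length + 1, s.toList.length < b ∧
    (s.toList ++ '#' :: s.toList.reverse).take b <:+ (s.toList ++ '#' :: s.toList.reverse)
instance (s : String) : Decidable (D_minChar s) := by unfold D_minChar; infer_instance

def Spec_minChar (s : String) (out : Int) : Prop := ¬ D_minChar s → out = minChar_alt s
instance (s : String) (out : Int) : Decidable (Spec_minChar s out) := by unfold Spec_minChar; infer_instance

def pvDiffWitness_minChar : String := "#"
def pvDiffWitnessOut_minChar : Int × Int := (-1, 0)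

-- ===== CLAIM (what is proved, stated in full; the proofs are below) =====
def Claim_unchanged_minChar : Prop := ∀ (s : String), Dom_minChar s → Spec_minChar s (minChar s)
def Claim_changed_minChar : Prop := Dom_minChar (pvDiffWitness_minChar) ∧ D_minChar (pvDiffWitness_minChar) ∧ minChar (pvDiffWitness_minChar) = pvDiffWitnessOut_minChar.1 ∧ minChar_alt (pvDiffWitness_minChar) = pvDiffWitnessOut_minChar.2 ∧ pvDiffWitnessOut_minChar.1 ≠ pvDiffWitnessOut_minChar.2
def Claim_exact_minChar : Prop := ∀ (s : String), Dom_minChar s → D_minChar s → minChar s ≠ minChar_alt s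

-- ===== LEMMAS AND PROOFS =====

-- longest proper border of v (largest b < |v| with v.take b a suffix of v); 0 for v = []
def brd (v : List Char) : Nat := Nat.findGreatest (fun b => v.take b <:+ v) (v.length - 1)

theorem brd_le (v : List Char) : brd v ≤ v.length - 1 := Nat.findGreatest_le _

theorem brd_lt (v : List Char) (hv : v ≠ []) : brd v < v.length := by
  have h1 := brd_le v
  have h2 : 0 < v.length := List.length_pos_iff.mpr hv
  omega

theorem brd_border (v : List Char) : v.take (brd v) <:+ v :=
  Nat.findGreatest_spec (P := fun b => v.take b <:+ v) (Nat.zero_le _)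
    (show v.take 0 <:+ v by rw [List.take_zero]; exact List.nil_suffix)

theorem brd_is_greatest (v : List Char) (b : Nat) (hb : b < v.length)
    (hs : v.take b <:+ v) : b ≤ brd v :=
  Nat.le_findGreatest (by omega) hs

theorem take_take_of_le (t : List Char) {b i : Nat} (h : b ≤ i) :
    (t.take i).take b = t.take b := by
  rw [List.take_take]; congr 1; omega

-- borders of the prefix t.take i, phrased on t itself
theorem border_le_brd (t : List Char) {b i : Nat} (hb : b < i) (hi : i ≤ t.length)
    (hs : t.take b <:+ t.take i) : b ≤ brd (t.take i) := by
  apply brd_is_greatest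
  · simp only [List.length_take]; omega
  · rwa [take_take_of_le t (Nat.le_of_lt hb)]

theorem brd_take_border (t : List Char) {i : Nat} (hi : i ≤ t.length) :
    t.take (brd (t.take i)) <:+ t.take i := by
  have h := brd_border (t.take i)
  have hle : brd (t.take i) ≤ i := by
    have h1 := brd_le (t.take i)
    have h2 : (t.take i).length = i := by simp only [List.length_take]; omega
    omega
  rwa [take_take_of_le t hle] at h

theorem take_succ_eq (t : List Char) {i : Nat} {c : Char} (h : t[i]? = some c) :
    t.take (i+1) = t.take i ++ [c] := by
  rw [List.take_add_one, h]; rfl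

theorem suffix_append_singleton {l₁ l₂ : List Char} (c : Char) (h : l₁ <:+ l₂) :
    l₁ ++ [c] <:+ l₂ ++ [c] := by
  rcases h with ⟨w, rfl⟩
  exact ⟨w, by simp⟩

-- extend a matching border by one character
theorem border_extend (t : List Char) {length i : Nat} {c : Char}
    (hlen : t[length]? = some c) (hi : t[i]? = some c)
    (hs : t.take length <:+ t.take i) :
    t.take (length+1) <:+ t.take (i+1) := by
  rw [take_succ_eq t hlen, take_succ_eq t hi]
  exact suffix_append_singleton c hs

-- strip the last character from a border of t.take (i+1)
theorem border_shrink (t : List Char) {b i : Nat} (hbi : b + 1 ≤ i)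
    (hin : i < t.length)
    (hs : t.take (b+1) <:+ t.take (i+1)) :
    t.take b <:+ t.take i ∧ t[b]? = t[i]? := by
  have hbn : b < t.length := by omega
  have hcb : t[b]? = some t[b] := List.getElem?_eq_getElem hbn
  have hci : t[i]? = some t[i] := List.getElem?_eq_getElem hin
  rw [take_succ_eq t hcb, take_succ_eq t hci] at hs
  rcases hs with ⟨w, hw⟩
  have hw' : (w ++ t.take b) ++ [t[b]] = t.take i ++ [t[i]] := by
    simpa [List.append_assoc] using hw
  obtain ⟨h1, h2⟩ := List.append_inj' hw' (by simp)
  refine ⟨⟨w, h1⟩, ?_⟩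
  simp only [List.cons.injEq] at h2
  rw [hcb, hci, h2.1]

-- the KMP loop invariant
def KmpInv (t : List Char) (lps : List Nat) (length i : Nat) : Prop :=
  1 ≤ i ∧ i ≤ t.length ∧ lps.length = t.length ∧ length < i ∧
  (∀ j, j < i → lps.getD j 0 = brd (t.take (j+1))) ∧
  (t.take length <:+ t.take i) ∧
  (∀ b, b < i → t.take b <:+ t.take i → t[b]? = t[i]? → b ≤ length)

theorem lpsLoop_spec (t : List Char) :
    ∀ fuel lps length i, KmpInv t lps length i →
      2 * (t.length - i) + length ≤ fuel →
      (lpsLoop t fuel lps length i).length = t.length ∧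
      (∀ j, j < t.length → (lpsLoop t fuel lps length i).getD j 0 = brd (t.take (j+1))) := by
  intro fuel
  induction fuel with
  | zero =>
    intro lps length i hI hf
    obtain ⟨h1, h2, h3, h4, h5, h6, h7⟩ := hI
    have hie : i = t.length := by omega
    subst hie
    exact ⟨h3, fun j hj => h5 j hj⟩
  | succ fuel ih =>
    intro lps length i hI hf
    obtain ⟨h1, h2, h3, h4, h5, h6, h7⟩ := hI
    by_cases hin : i < t.length
    · have hci : t[i]? = some t[i] := List.getElem?_eq_getElem hin
      have hcl : t[length]? = some t[length] := List.getElem?_eq_getElem (by omega)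
      by_cases heq : t[i]? = t[length]?
      · -- match branch
        rw [lpsLoop, if_pos hin, if_pos heq]
        have hchar : t[length]? = some t[i] := by rw [← heq, hci]
        have hext : t.take (length+1) <:+ t.take (i+1) :=
          border_extend t hchar hci h6
        have hbrd : brd (t.take (i+1)) = length + 1 := by
          have hge : length + 1 ≤ brd (t.take (i+1)) :=
            border_le_brd t (by omega) (by omega) hext
          have hle : brd (t.take (i+1)) ≤ length + 1 := by
            by_contra hc
            have hc' : length + 2 ≤ brd (t.take (i+1)) := by omega
            have hBlt : brd (t.take (i+1)) < i + 1 := by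
              have hne : t.take (i+1) ≠ [] := by
                apply List.ne_nil_of_length_pos
                simp only [List.length_take]; omega
              have h' := brd_lt (t.take (i+1)) hne
              have hl' : (t.take (i+1)).length = i + 1 := by
                simp only [List.length_take]; omega
              omega
            obtain ⟨k, hk⟩ : ∃ k, brd (t.take (i+1)) = k + 1 := ⟨brd (t.take (i+1)) - 1, by omega⟩
            have hBs : t.take (k+1) <:+ t.take (i+1) := hk ▸ brd_take_border t (by omega)
            obtain ⟨hshr, hchr⟩ := border_shrink t (by omega) hin hBs
            have hcond := h7 _ (by omega) hshr hchr
            omega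
          omega
        refine ih (lps.set i (length+1)) (length+1) (i+1) ?_ (by omega)
        refine ⟨by omega, by omega, by simpa using h3, by omega, ?_, hext, ?_⟩
        · intro j hj
          by_cases hji : j = i
          · subst hji
            rw [List.getD_eq_getElem?_getD, List.getElem?_set_self (by omega), hbrd]
            rfl
          · rw [List.getD_eq_getElem?_getD, List.getElem?_set_ne (by omega),
                ← List.getD_eq_getElem?_getD]
            exact h5 j (by omega)
        · intro b hb hbs _
          have := border_le_brd t hb (by omega) hbs
          omega
      · -- mismatch
        by_cases hlz : length ≠ 0
        · rw [lpsLoop, if_pos hin, if_neg heq, if_pos hlz]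
          have hlpos : 1 ≤ length := by omega
          have hval : lps.getD (length-1) 0 = brd (t.take length) := by
            have h' := h5 (length-1) (by omega)
            have hll : length - 1 + 1 = length := by omega
            rwa [hll] at h'
          have htlen_ne : t.take length ≠ [] := by
            apply List.ne_nil_of_length_pos
            simp only [List.length_take]; omega
          have hL'lt : brd (t.take length) < length := by
            have h' := brd_lt (t.take length) htlen_ne
            have hl' : (t.take length).length = length := by
              simp only [List.length_take]; omega
            omega
          have hL's : t.take (brd (t.take length)) <:+ t.take i :=
            List.IsSuffix.trans (brd_take_border t (by omega)) h6
          refine ih lps (lps.getD (length-1) 0) i ?_ (by rw [hval]; omega)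
          rw [hval]
          refine ⟨h1, h2, h3, by omega, h5, hL's, ?_⟩
          intro b hb hbs hbc
          have hble : b ≤ length := h7 b hb hbs hbc
          rcases Nat.lt_or_ge b length with hblt | hbge
          · have hbsl : t.take b <:+ t.take length := by
              apply List.suffix_of_suffix_length_le hbs h6
              simp only [List.length_take]; omega
            exact border_le_brd t hblt (by omega) hbsl
          · exfalso
            have hbl : b = length := by omega
            subst hbl
            exact heq hbc.symm
        · have hl0 : length = 0 := by omega
          subst hl0
          rw [lpsLoop, if_pos hin, if_neg heq, if_neg (by simp)]
          have hbrd0 : brd (t.take (i+1)) = 0 := by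
            by_contra hc
            have hBpos : 1 ≤ brd (t.take (i+1)) := by omega
            have hBlt : brd (t.take (i+1)) < i + 1 := by
              have hne : t.take (i+1) ≠ [] := by
                apply List.ne_nil_of_length_pos
                simp only [List.length_take]; omega
              have h' := brd_lt (t.take (i+1)) hne
              have hl' : (t.take (i+1)).length = i + 1 := by
                simp only [List.length_take]; omega
              omega
            obtain ⟨k, hk⟩ : ∃ k, brd (t.take (i+1)) = k + 1 := ⟨brd (t.take (i+1)) - 1, by omega⟩
            have hBs : t.take (k+1) <:+ t.take (i+1) := hk ▸ brd_take_border t (by omega)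
            obtain ⟨hshr, hchr⟩ := border_shrink t (by omega) hin hBs
            have hB1 := h7 _ (by omega) hshr hchr
            have hB0 : k = 0 := by omega
            rw [hB0] at hchr
            exact heq hchr.symm
          refine ih (lps.set i 0) 0 (i+1) ?_ (by omega)
          refine ⟨by omega, by omega, by simpa using h3, by omega, ?_,
            by rw [List.take_zero]; exact List.nil_suffix, ?_⟩
          · intro j hj
            by_cases hji : j = i
            · subst hji
              rw [List.getD_eq_getElem?_getD, List.getElem?_set_self (by omega), hbrd0]
              rfl
            · rw [List.getD_eq_getElem?_getD, List.getElem?_set_ne (by omega),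
                  ← List.getD_eq_getElem?_getD]
              exact h5 j (by omega)
          · intro b hb hbs _
            have := border_le_brd t hb (by omega) hbs
            omega
    · -- i = t.length: loop exits
      rw [lpsLoop, if_neg hin]
      have hie : i = t.length := by omega
      subst hie
      exact ⟨h3, fun j hj => h5 j hj⟩

-- B's loop is Nat.findGreatest of "take L is a palindrome"
theorem palPrefLoop_eq (u : List Char) :
    ∀ L, palPrefLoop u L = Nat.findGreatest (fun b => u.take b = (u.take b).reverse) L := by
  intro L
  induction L with
  | zero => simp [palPrefLoop]
  | succ L ih =>
    rw [palPrefLoop, Nat.findGreatest_succ]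
    by_cases h : u.take (L+1) = (u.take (L+1)).reverse
    · rw [if_pos h, if_pos h]
    · rw [if_neg h, if_neg h, ih]

-- the mirrored suffix of length b ≤ |u| is the reversed prefix of u
theorem drop_mirror (u : List Char) {b : Nat} (hb : b ≤ u.length) :
    List.drop ((u ++ '#' :: u.reverse).length - b) (u ++ '#' :: u.reverse) = (u.take b).reverse := by
  have hlen : (u ++ '#' :: u.reverse).length = 2 * u.length + 1 := by
    simp only [List.length_append, List.length_cons, List.length_reverse]; omega
  rw [List.reverse_take, hlen, List.drop_append,
      List.drop_eq_nil_of_le (by omega), List.nil_append,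
      show 2 * u.length + 1 - b - u.length = (u.length - b) + 1 by omega,
      List.drop_succ_cons]

-- borders of length ≤ |u| of u ++ '#' :: u.reverse are exactly the palindromic prefixes of u
theorem border_iff_palPrefix (u : List Char) {b : Nat} (hble : b ≤ u.length) :
    ((u ++ '#' :: u.reverse).take b <:+ (u ++ '#' :: u.reverse)) ↔
      u.take b = (u.take b).reverse := by
  have htlen : (u ++ '#' :: u.reverse).length = 2 * u.length + 1 := by
    simp only [List.length_append, List.length_cons, List.length_reverse]; omega
  rw [List.suffix_iff_eq_drop, List.length_take, Nat.min_eq_left (by omega),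
      List.take_append_of_le_length hble, drop_mirror u hble]

-- '#' occurs in u ++ '#' :: u.reverse exactly at position u.length
theorem hash_get (u : List Char) (hu : '#' ∉ u) (k : Nat)
    (hk : k < (u ++ '#' :: u.reverse).length) :
    (u ++ '#' :: u.reverse)[k]? = some '#' ↔ k = u.length := by
  constructor
  · intro h
    by_contra hne
    rcases Nat.lt_or_ge k u.length with hlt | hge
    · rw [List.getElem?_append_left hlt, List.getElem?_eq_getElem hlt] at h
      exact hu ((Option.some.inj h) ▸ List.getElem_mem hlt)
    · have hgt : u.length < k := by omega
      rw [List.getElem?_append_right (by omega)] at h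
      have hk1 : k - u.length = (k - u.length - 1) + 1 := by omega
      rw [hk1, List.getElem?_cons_succ] at h
      have hk2 : k - u.length - 1 < u.reverse.length := by
        simp only [List.length_reverse]
        simp only [List.length_append, List.length_cons, List.length_reverse] at hk
        omega
      rw [List.getElem?_eq_getElem hk2] at h
      have hmem : '#' ∈ u.reverse := (Option.some.inj h) ▸ List.getElem_mem hk2
      exact hu (List.mem_reverse.mp hmem)
  · intro h
    subst h
    rw [List.getElem?_append_right le_rfl]
    simp only [Nat.sub_self, List.getElem?_cons_zero]

-- a '#'-free string has no border of the combined string longer than itself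
theorem no_long_border (u : List Char) (hu : '#' ∉ u) :
    ¬ ∃ b < 2 * u.length + 1, u.length < b ∧
      (u ++ '#' :: u.reverse).take b <:+ (u ++ '#' :: u.reverse) := by
  rintro ⟨b, hb1, hb2, hs⟩
  have htlen : (u ++ '#' :: u.reverse).length = 2 * u.length + 1 := by
    simp only [List.length_append, List.length_cons, List.length_reverse]; omega
  have heq : (u ++ '#' :: u.reverse).take b
      = (u ++ '#' :: u.reverse).drop ((u ++ '#' :: u.reverse).length - b) := by
    have h' := List.suffix_iff_eq_drop.mp hs
    rwa [List.length_take, Nat.min_eq_left (by omega)] at h'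
  have h1 : ((u ++ '#' :: u.reverse).take b)[u.length]? = some '#' := by
    rw [List.getElem?_take, if_pos hb2]
    exact (hash_get u hu u.length (by omega)).mpr rfl
  rw [heq, List.getElem?_drop] at h1
  have h2 := (hash_get u hu _ (by omega)).mp h1
  omega

-- without a long spurious border, A's failure-function value is B's palindromic-prefix length
theorem brd_eq_palv (u : List Char)
    (hnd : ¬ ∃ b < 2 * u.length + 1, u.length < b ∧
      (u ++ '#' :: u.reverse).take b <:+ (u ++ '#' :: u.reverse)) :
    brd (u ++ '#' :: u.reverse) = palPrefLoop u u.length := by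
  have htlen : (u ++ '#' :: u.reverse).length = 2 * u.length + 1 := by
    simp only [List.length_append, List.length_cons, List.length_reverse]; omega
  have hlt : brd (u ++ '#' :: u.reverse) < (u ++ '#' :: u.reverse).length :=
    brd_lt _ (by simp)
  have hble : brd (u ++ '#' :: u.reverse) ≤ u.length := by
    by_contra hc
    exact hnd ⟨brd (u ++ '#' :: u.reverse), by omega, by omega, brd_border _⟩
  rw [palPrefLoop_eq]
  apply Nat.le_antisymm
  · exact Nat.le_findGreatest hble ((border_iff_palPrefix u hble).mp (brd_border _))
  · have hmle : Nat.findGreatest (fun b => u.take b = (u.take b).reverse) u.length ≤ u.length :=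
      Nat.findGreatest_le _
    have hmP : u.take (Nat.findGreatest (fun b => u.take b = (u.take b).reverse) u.length)
        = (u.take (Nat.findGreatest (fun b => u.take b = (u.take b).reverse) u.length)).reverse :=
      Nat.findGreatest_spec (P := fun b => u.take b = (u.take b).reverse) (Nat.zero_le _)
        (show u.take 0 = (u.take 0).reverse by rw [List.take_zero]; rfl)
    exact brd_is_greatest _ _ (by omega) ((border_iff_palPrefix u hmle).mpr hmP)

-- a long spurious border pushes A's failure-function value above |u|
theorem brd_gt_of_D (u : List Char)
    (hd : ∃ b < 2 * u.length + 1, u.length < b ∧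
      (u ++ '#' :: u.reverse).take b <:+ (u ++ '#' :: u.reverse)) :
    u.length < brd (u ++ '#' :: u.reverse) := by
  obtain ⟨b, hb1, hb2, hs⟩ := hd
  have htlen : (u ++ '#' :: u.reverse).length = 2 * u.length + 1 := by
    simp only [List.length_append, List.length_cons, List.length_reverse]; omega
  have := brd_is_greatest _ b (by omega) hs
  omega

-- lps[-1] on a nonempty list is the last entry
theorem pyGet_neg_one (l : List Nat) :
    (PySem.List.pyGet? l (-1)).getD 0 = l.getD (l.length - 1) 0 := by
  rw [PySem.List.pyGet?_neg_one, List.getD_eq_getElem?_getD, List.getLast?_eq_getElem?]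

-- the initial state satisfies the invariant
theorem kmpInv_init (t : List Char) (ht : 1 ≤ t.length) :
    KmpInv t (List.replicate t.length 0) 0 1 := by
  refine ⟨le_rfl, ht, by simp, by omega, ?_,
    by rw [List.take_zero]; exact List.nil_suffix, ?_⟩
  · intro j hj
    have hj0 : j = 0 := by omega
    subst hj0
    have h1 : (t.take 1).length = 1 := by simp only [List.length_take]; omega
    unfold brd
    rw [h1]
    simp
  · intro b hb _ _
    omega

-- A's result is len(s) minus the longest proper border of s + '#' + reversed(s)
theorem minChar_eq_brd (s : String) :
    minChar s = (s.toList.length : Int) - (brd (s.toList ++ '#' :: s.toList.reverse) : Nat) := by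
  unfold minChar
  have htlen : (s.toList ++ '#' :: s.toList.reverse).length = 2 * s.toList.length + 1 := by
    simp only [List.length_append, List.length_cons, List.length_reverse]; omega
  obtain ⟨hlen, hval⟩ := lpsLoop_spec (s.toList ++ '#' :: s.toList.reverse)
    (2 * (s.toList ++ '#' :: s.toList.reverse).length)
    (List.replicate (s.toList ++ '#' :: s.toList.reverse).length 0) 0 1
    (kmpInv_init _ (by omega)) (by omega)
  rw [pyGet_neg_one, hlen]
  have hv := hval ((s.toList ++ '#' :: s.toList.reverse).length - 1) (by omega)
  rw [show (s.toList ++ '#' :: s.toList.reverse).length - 1 + 1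
        = (s.toList ++ '#' :: s.toList.reverse).length by omega,
      List.take_length] at hv
  rw [hv]

-- ===== VERDICT (by name: the statements are the Claim_ definitions above) =====
theorem minChar_spec : Claim_unchanged_minChar := by
  intro s _ hnd
  unfold minChar_alt
  refine minChar_eq_brd s ▸ ?_
  rw [brd_eq_palv s.toList ?hnb]
  case hnb =>
    by_cases hm : '#' ∈ s.toList
    · intro hex
      exact hnd (by unfold D_minChar; exact ⟨hm, hex⟩)
    · exact no_long_border s.toList hm

theorem minChar_changed : Claim_changed_minChar := by
  unfold Claim_changed_minChar
  decide

theorem minChar_tight : Claim_exact_minChar := by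
  intro s _ hd heq
  have hgt : s.toList.length < brd (s.toList ++ '#' :: s.toList.reverse) :=
    brd_gt_of_D s.toList (by unfold D_minChar at hd; exact hd.2)
  have hple : palPrefLoop s.toList s.toList.length ≤ s.toList.length := by
    rw [palPrefLoop_eq]; exact Nat.findGreatest_le _
  rw [minChar_eq_brd] at heq
  unfold minChar_alt at heq
  omega
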